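-- pv_equiv track=rewrite | github.com/alexey198631/trainings | edx_introduction_to_computer_science_and_programming_using_Python/Problem_Set_1_Python_basics/exam7v.py | pfl
-- ===== SOURCE A (Python) =====
-- al = "abcdefghijklmnopqrstuvwxyz"
--
-- def alpha(al):
--     alpha = {}
--     for i in range(0,len(al)):
--         alpha.update({al[i]: i+1})
--     return alpha
--
-- def pfl(word):
--     num = list()
--     ranks = alpha(al)
--     for i in range(0,len(word)):
--         l = word[i].lower()
--         for k in ranks.keys():
--             if k == l:
--                 num.append(ranks[k]*i)
--
--     return num
-- ===== SOURCE B (Python) =====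
-- al = "abcdefghijklmnopqrstuvwxyz"
--
-- def pfl(word):
--     # closed-form rank via ord instead of building and scanning an alphabet dict
--     return [(ord(c.lower()) - 96) * i
--             for i, c in enumerate(word)
--             if 1 <= ord(c.lower()) - 96 <= 26]
-- ===== Notes on version B (the rewrite author's own statement) =====
-- stated objective: simpler
-- what changed: B drops A's alphabet dict (built by indexing the constant string and queried by scanning all 26 keys per character) and instead computes each letter's rank in closed form as ord(c.lower())-96 inside a single comprehension, keeping it only when it lies in 1..26.
import Mathlib
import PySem

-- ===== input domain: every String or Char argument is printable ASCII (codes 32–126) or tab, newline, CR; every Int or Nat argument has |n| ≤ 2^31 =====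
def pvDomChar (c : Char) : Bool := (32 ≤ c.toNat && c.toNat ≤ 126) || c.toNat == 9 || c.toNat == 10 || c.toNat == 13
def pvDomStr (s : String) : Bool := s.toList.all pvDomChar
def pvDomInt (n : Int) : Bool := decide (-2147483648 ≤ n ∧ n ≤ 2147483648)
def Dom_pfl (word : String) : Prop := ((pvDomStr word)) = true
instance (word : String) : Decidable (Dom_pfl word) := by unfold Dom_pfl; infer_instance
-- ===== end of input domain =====

-- B replaces A's built-and-scanned alphabet dict by a closed-form ord-based rank inside one
-- comprehension (objective: simpler; same return value).

-- ===== PORT A =====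
-- module constant al
def pvAlA : List Char := ['a','b','c','d','e','f','g','h','i','j','k','l','m','n','o','p','q','r','s','t','u','v','w','x','y','z']

-- helper alpha(al): dict built by updating with {al[i]: i+1} for i in range(len(al))
def alphaA (alist : List Char) : PySem.Dict Char Int :=
  (PySem.List.pyRange 0 alist.length 1).foldl
    (fun d i => d.insert (PySem.List.pyGetD alist i ' ') (i + 1))
    PySem.Dict.empty

def pfl (word : String) : List Int :=
  let cs := word.toList
  let ranks := alphaA pvAlA
  (PySem.List.pyRange 0 cs.length 1).foldl
    (fun num i =>
      let l := PySem.Chars.lowerChar (PySem.List.pyGetD cs i ' ')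
      ranks.keys.foldl
        (fun num k => if k == l then num ++ [ranks.getD k 0 * i] else num)
        num)
    []

-- ===== PORT B =====
def pfl_alt (word : String) : List Int :=
  (PySem.List.enumerate word.toList).filterMap
    (fun p =>
      let r : Int := ((PySem.Chars.lowerChar p.2).toNat : Int) - 96
      if 1 ≤ r ∧ r ≤ 26 then some (r * p.1) else none)

-- ===== PRECONDITION & SPEC =====
def Spec_pfl (word : String) (out : List Int) : Prop := out = pfl_alt word
instance (word : String) (out : List Int) : Decidable (Spec_pfl word out) := by unfold Spec_pfl; infer_instance

-- ===== CLAIM (what is proved, stated in full; the proofs are below) =====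
def Claim_equal_pfl : Prop := ∀ (word : String), Dom_pfl word → Spec_pfl word (pfl word)

-- ===== LEMMAS AND PROOFS =====

-- scanning a duplicate-free key list for l appends g l exactly when l is a key
theorem scan_keys_fold (ks : List Char) (l : Char) (g : Char → Int) (num : List Int)
    (hnd : ks.Nodup) :
    ks.foldl (fun num k => if k == l then num ++ [g k] else num) num
      = num ++ (if l ∈ ks then [g l] else []) := by
  induction ks generalizing num with
  | nil => simp
  | cons k ks ih =>
    rcases List.nodup_cons.mp hnd with ⟨hk, hnd'⟩
    rw [List.foldl_cons]
    by_cases h : k = l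
    · subst h
      rw [if_pos (by simp), ih (num ++ [g k]) hnd', if_neg hk]
      simp
    · rw [if_neg (by simpa using h), ih num hnd']
      by_cases h' : l ∈ ks
      · rw [if_pos h', if_pos (List.mem_cons.mpr (Or.inr h'))]
      · rw [if_neg h', if_neg (by
          rw [List.mem_cons]
          rintro (e | hh)
          · exact h e.symm
          · exact h' hh)]

theorem keys_alphaA : (alphaA pvAlA).keys = pvAlA := by decide

theorem nodup_alphaA_keys : (alphaA pvAlA).keys.Nodup := by decide

-- a char equals Char.ofNat of its own code
theorem char_eq_ofNat (l : Char) (n : Nat) (h1 : l.toNat = n)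
    (h2 : (Char.ofNat n).toNat = n) : l = Char.ofNat n :=
  Char.ext (UInt32.toNat_inj.mp (h1.trans h2.symm))

theorem mem_pvAlA (l : Char) : l ∈ pvAlA ↔ 97 ≤ l.toNat ∧ l.toNat ≤ 122 := by
  constructor
  · intro h; fin_cases h <;> exact ⟨by decide, by decide⟩
  · rintro ⟨h1, h2⟩
    interval_cases hn : l.toNat <;>
      · rw [char_eq_ofNat l _ hn (by decide)]; decide

theorem getD_alphaA (l : Char) (h : l ∈ pvAlA) :
    (alphaA pvAlA).getD l 0 = (l.toNat : Int) - 96 := by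
  fin_cases h <;> decide

-- per-character agreement of the two branch forms
theorem char_case (c : Char) (i : Int) :
    (if PySem.Chars.lowerChar c ∈ pvAlA
      then [(alphaA pvAlA).getD (PySem.Chars.lowerChar c) 0 * i] else [])
      = (if 1 ≤ ((PySem.Chars.lowerChar c).toNat : Int) - 96 ∧
            ((PySem.Chars.lowerChar c).toNat : Int) - 96 ≤ 26
          then some ((((PySem.Chars.lowerChar c).toNat : Int) - 96) * i) else none).toList := by
  set l := PySem.Chars.lowerChar c with hl
  by_cases h : l ∈ pvAlA
  · have hb := (mem_pvAlA l).mp h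
    rw [if_pos h, getD_alphaA l h, if_pos (by omega)]
    rfl
  · have hb := fun hh => h ((mem_pvAlA l).mpr hh)
    rw [if_neg h, if_neg (by intro hc; exact hb (by omega))]
    rfl

theorem filterMap_eq_flatMap_toList {α β : Type} (xs : List α) (g : α → Option β) :
    xs.filterMap g = xs.flatMap (fun p => (g p).toList) := by
  induction xs with
  | nil => rfl
  | cons x xs ih => cases h : g x <;> simp [h, ih]

-- ===== VERDICT (by name: the statement is the Claim_ definition above) =====
theorem pfl_spec : Claim_equal_pfl := by
  intro word _
  show pfl word = pfl_alt word
  unfold pfl pfl_alt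
  dsimp only
  set cs := word.toList with hcs
  -- A: replace the inner key scan by its membership form, then turn the append loop into flatMap
  have hA : (PySem.List.pyRange 0 (cs.length : Int) 1).foldl
      (fun num i => (alphaA pvAlA).keys.foldl
        (fun num k => if k == PySem.Chars.lowerChar (PySem.List.pyGetD cs i ' ')
          then num ++ [(alphaA pvAlA).getD k 0 * i] else num) num) []
      = (PySem.List.pyRange 0 (cs.length : Int) 1).foldl
      (fun num i => num ++ (if PySem.Chars.lowerChar (PySem.List.pyGetD cs i ' ') ∈ pvAlA
          then [(alphaA pvAlA).getD (PySem.Chars.lowerChar (PySem.List.pyGetD cs i ' ')) 0 * i]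
          else [])) [] :=
    PySem.List.foldl_congr_mem _ _ _ _ (fun num i _ => by
      rw [scan_keys_fold _ _ _ _ nodup_alphaA_keys, keys_alphaA])
  rw [hA, PySem.List.foldl_append_eq_flatMap, List.nil_append]
  -- B: enumerate as a map over the index range, then filterMap as flatMap
  rw [PySem.List.enumerate_eq_map_pyRange (d := ' '), List.filterMap_map,
    filterMap_eq_flatMap_toList]
  congr 1
  funext i
  exact char_case (PySem.List.pyGetD cs i ' ') i
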